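-- pv_equiv track=rewrite | github.com/akikodesu/comp-think.github.io | exercises/understanding/advanced/exercise_27.py | c_rec
-- ===== SOURCE A (Python) =====
-- def c_rec(chars, mat_list):
--     result = ["a", "e", "i", "o", "u"]
--
--     if len(mat_list) == 0:
--         result = sorted(list(chars))
--         return "".join(result)
--     elif mat_list[0] % 2 == 0:
--         idx = mat_list[0] % len(result)
--         chars.add(result[idx])
--
--     return c_rec(chars, mat_list[1:])
-- ===== SOURCE B (Python) =====
-- def c_rec(chars, mat_list):
--     vowels = ["a", "e", "i", "o", "u"]
--     for x in mat_list:
--         if x % 2 == 0: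
--             chars.add(vowels[x % 5])
--     return "".join(sorted(chars))
-- ===== Notes on version B (the rewrite author's own statement) =====
-- stated objective: simpler
-- what changed: Replaces the recursion that rebuilds the vowel table and slices mat_list[1:] at every level with a single iterative loop over mat_list followed by one sorted-join; same mutation of the passed-in set.
import Mathlib
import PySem

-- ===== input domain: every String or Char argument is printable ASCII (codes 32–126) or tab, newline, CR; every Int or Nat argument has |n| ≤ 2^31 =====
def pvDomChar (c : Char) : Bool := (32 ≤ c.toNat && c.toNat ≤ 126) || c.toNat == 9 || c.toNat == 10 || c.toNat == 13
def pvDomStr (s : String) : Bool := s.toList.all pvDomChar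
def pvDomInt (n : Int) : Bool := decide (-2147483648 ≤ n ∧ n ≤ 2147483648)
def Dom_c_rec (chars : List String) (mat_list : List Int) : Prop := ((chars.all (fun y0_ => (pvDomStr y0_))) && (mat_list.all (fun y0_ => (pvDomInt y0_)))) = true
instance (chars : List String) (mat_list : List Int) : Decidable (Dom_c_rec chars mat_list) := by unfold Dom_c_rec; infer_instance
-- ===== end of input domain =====

-- ===== PORT A =====
-- A: recursive; B: iterative foldl + one sorted-join. Equivalence is about the RETURN value
-- (both Pythons mutate the passed-in set `chars` identically).
def c_rec (chars : List String) (mat_list : List Int) : String :=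
  match mat_list with
  | [] => PySem.Str.join "" (PySem.List.sorted chars (fun y => y) false)
  | x :: rest =>
      if PySem.Int.mod x 2 = 0 then
        let result := ["a", "e", "i", "o", "u"]
        let idx := PySem.Int.mod x 5
        c_rec (PySem.Set.add chars ((PySem.List.pyGet? result idx).getD "")) rest
      else
        c_rec chars rest

-- ===== PORT B =====
def c_rec_alt (chars : List String) (mat_list : List Int) : String :=
  let vowels := ["a", "e", "i", "o", "u"]
  let final := mat_list.foldl
    (fun s x =>
      if PySem.Int.mod x 2 = 0 then
        PySem.Set.add s ((PySem.List.pyGet? vowels (PySem.Int.mod x 5)).getD "")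
      else s) chars
  PySem.Str.join "" (PySem.List.sorted final (fun y => y) false)

-- ===== PRECONDITION & SPEC =====
def Spec_c_rec (chars : List String) (mat_list : List Int) (out : String) : Prop := out = c_rec_alt chars mat_list
instance (chars : List String) (mat_list : List Int) (out : String) : Decidable (Spec_c_rec chars mat_list out) := by unfold Spec_c_rec; infer_instance

-- ===== CLAIM (what is proved, stated in full; the proofs are below) =====
def Claim_equal_c_rec : Prop := ∀ (chars : List String) (mat_list : List Int), Dom_c_rec chars mat_list → Spec_c_rec chars mat_list (c_rec chars mat_list)

-- ===== LEMMAS AND PROOFS =====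

-- ===== VERDICT (by name: the statement is the Claim_ definition above) =====
theorem c_rec_eq_alt (mat_list : List Int) : ∀ chars : List String,
    c_rec chars mat_list = c_rec_alt chars mat_list := by
  induction mat_list with
  | nil => intro chars; rfl
  | cons x rest ih =>
      intro chars
      show (if PySem.Int.mod x 2 = 0 then
              c_rec (PySem.Set.add chars ((PySem.List.pyGet? ["a", "e", "i", "o", "u"] (PySem.Int.mod x 5)).getD "")) rest
            else c_rec chars rest) = c_rec_alt chars (x :: rest)
      by_cases h : PySem.Int.mod x 2 = 0
      · rw [if_pos h]
        rw [ih]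
        simp only [c_rec_alt, List.foldl, if_pos h]
      · rw [if_neg h]
        rw [ih]
        simp only [c_rec_alt, List.foldl, if_neg h]

theorem c_rec_spec : Claim_equal_c_rec := by
  intro chars mat_list _
  unfold Spec_c_rec
  exact c_rec_eq_alt mat_list chars
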